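-- pv_equiv track=rewrite | github.com/liskos/isakovich2023 | варианты 2025/лашин/в2/27.py | clasterisation2
-- ===== SOURCE A (Python) =====
-- def clasterisation2(data):
--     clasters = [[], [], []]
--     for x, y in data:
--         if x > 2:
--             clasters[0].append([x, y])
--         elif y > 0:
--             clasters[1].append([x, y])
--         else:
--             clasters[2].append([x, y])
--     return clasters
-- ===== SOURCE B (Python) =====
-- def clasterisation2(data):
--     return [
--         [[x, y] for x, y in data if x > 2],
--         [[x, y] for x, y in data if x <= 2 and y > 0],
--         [[x, y] for x, y in data if x <= 2 and y <= 0],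
--     ]
-- ===== Notes on version B (the rewrite author's own statement) =====
-- stated objective: idiomatic
-- what changed: Replaced the single cascading-branch loop that appends into mutable cluster lists with three independent filtering list comprehensions, one per cluster.
import Mathlib
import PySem

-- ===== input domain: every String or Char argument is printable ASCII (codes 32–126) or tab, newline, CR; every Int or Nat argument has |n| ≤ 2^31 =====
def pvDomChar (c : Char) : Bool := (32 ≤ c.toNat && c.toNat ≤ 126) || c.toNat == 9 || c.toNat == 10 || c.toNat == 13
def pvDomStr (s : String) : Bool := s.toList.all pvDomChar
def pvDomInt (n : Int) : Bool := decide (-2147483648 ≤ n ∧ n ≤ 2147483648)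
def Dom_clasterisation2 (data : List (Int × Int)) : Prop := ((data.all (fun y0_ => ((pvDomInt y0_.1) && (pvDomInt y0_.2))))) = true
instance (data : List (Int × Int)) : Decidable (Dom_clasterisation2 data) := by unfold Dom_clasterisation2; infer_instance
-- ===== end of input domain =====

-- ===== PORT A =====
def clasterisation2 (data : List (Int × Int)) : List (List (List Int)) :=
  let clasters : List (List Int) × List (List Int) × List (List Int) := ([], [], [])
  let clasters := data.foldl (fun (c : List (List Int) × List (List Int) × List (List Int)) xy =>
    let (x, y) := xy
    if x > 2 then (c.1 ++ [[x, y]], c.2.1, c.2.2)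
    else if y > 0 then (c.1, c.2.1 ++ [[x, y]], c.2.2)
    else (c.1, c.2.1, c.2.2 ++ [[x, y]])) clasters
  [clasters.1, clasters.2.1, clasters.2.2]

-- ===== PORT B =====
def clasterisation2_alt (data : List (Int × Int)) : List (List (List Int)) :=
  [ (data.filter (fun p => p.1 > 2)).map (fun p => [p.1, p.2]),
    (data.filter (fun p => p.1 ≤ 2 && p.2 > 0)).map (fun p => [p.1, p.2]),
    (data.filter (fun p => p.1 ≤ 2 && p.2 ≤ 0)).map (fun p => [p.1, p.2]) ]

-- ===== PRECONDITION & SPEC =====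
def Spec_clasterisation2 (data : List (Int × Int)) (out : List (List (List Int))) : Prop := out = clasterisation2_alt data
instance (data : List (Int × Int)) (out : List (List (List Int))) : Decidable (Spec_clasterisation2 data out) := by unfold Spec_clasterisation2; infer_instance

-- ===== CLAIM (what is proved, stated in full; the proofs are below) =====
def Claim_equal_clasterisation2 : Prop := ∀ (data : List (Int × Int)), Dom_clasterisation2 data → Spec_clasterisation2 data (clasterisation2 data)

-- ===== LEMMAS AND PROOFS =====

-- ===== VERDICT (by name: the statement is the Claim_ definition above) =====
lemma clast_loop (data : List (Int × Int)) (a b c : List (List Int)) :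
    data.foldl (fun (c : List (List Int) × List (List Int) × List (List Int)) xy =>
      let (x, y) := xy
      if x > 2 then (c.1 ++ [[x, y]], c.2.1, c.2.2)
      else if y > 0 then (c.1, c.2.1 ++ [[x, y]], c.2.2)
      else (c.1, c.2.1, c.2.2 ++ [[x, y]])) (a, b, c)
    = (a ++ (data.filter (fun p => p.1 > 2)).map (fun p => [p.1, p.2]),
       b ++ (data.filter (fun p => p.1 ≤ 2 && p.2 > 0)).map (fun p => [p.1, p.2]),
       c ++ (data.filter (fun p => p.1 ≤ 2 && p.2 ≤ 0)).map (fun p => [p.1, p.2])) := by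
  induction data generalizing a b c with
  | nil => simp
  | cons hd tl ih =>
    obtain ⟨x, y⟩ := hd
    simp only [List.foldl_cons, List.filter_cons]
    by_cases hx : x > 2
    · have h2 : ¬ (x ≤ 2) := by omega
      simp [hx, h2, ih]
    · have h2 : x ≤ 2 := by omega
      by_cases hy : y > 0
      · have h3 : ¬ (y ≤ 0) := by omega
        simp [hx, h2, hy, h3, ih]
      · have h3 : y ≤ 0 := by omega
        simp [hx, h2, hy, h3, ih]

theorem clasterisation2_spec : Claim_equal_clasterisation2 := by
  intro data _
  unfold Spec_clasterisation2 clasterisation2 clasterisation2_alt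
  simp [clast_loop]
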